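-- pv_equiv track=rewrite | github.com/MushroomFleet/DJZ-Droidz-TTS | djz_hawk/src/diphone_synthesizer.py | _phonemes_to_diphones
-- ===== SOURCE A (Python) =====
-- from typing import Dict, List, Tuple, Optional
--
-- def _phonemes_to_diphones(phonemes: List[str]) -> List[str]:
--     """Convert phoneme sequence to diphone sequence"""
--     if len(phonemes) < 2:
--         return [f"SIL_{phonemes[0]}" if phonemes else "SIL_SIL"]
--
--     diphones = []
--
--     # Add initial silence-to-first-phoneme diphone
--     diphones.append(f"SIL_{phonemes[0]}")
--
--     # Add phoneme-to-phoneme diphones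
--     for i in range(len(phonemes) - 1):
--         diphones.append(f"{phonemes[i]}_{phonemes[i+1]}")
--
--     # Add final phoneme-to-silence diphone
--     diphones.append(f"{phonemes[-1]}_SIL")
--
--     return diphones
-- ===== SOURCE B (Python) =====
-- from typing import List
--
-- def _phonemes_to_diphones(phonemes: List[str]) -> List[str]:
--     """Convert phoneme sequence to diphone sequence (sentinel-padded pairwise pass)."""
--     if len(phonemes) < 2:
--         return [f"SIL_{phonemes[0]}" if phonemes else "SIL_SIL"]
--     padded = ["SIL"] + phonemes + ["SIL"]
--     return [f"{a}_{b}" for a, b in zip(padded, padded[1:])]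
-- ===== Notes on version B (the rewrite author's own statement) =====
-- stated objective: simpler
-- what changed: Replaces A's three separate constructions (explicit SIL-to-first diphone, an index loop over range(len-1), explicit last-to-SIL diphone) with one uniform pairwise comprehension over a SIL-padded list, keeping A's len<2 guard.
import Mathlib
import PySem

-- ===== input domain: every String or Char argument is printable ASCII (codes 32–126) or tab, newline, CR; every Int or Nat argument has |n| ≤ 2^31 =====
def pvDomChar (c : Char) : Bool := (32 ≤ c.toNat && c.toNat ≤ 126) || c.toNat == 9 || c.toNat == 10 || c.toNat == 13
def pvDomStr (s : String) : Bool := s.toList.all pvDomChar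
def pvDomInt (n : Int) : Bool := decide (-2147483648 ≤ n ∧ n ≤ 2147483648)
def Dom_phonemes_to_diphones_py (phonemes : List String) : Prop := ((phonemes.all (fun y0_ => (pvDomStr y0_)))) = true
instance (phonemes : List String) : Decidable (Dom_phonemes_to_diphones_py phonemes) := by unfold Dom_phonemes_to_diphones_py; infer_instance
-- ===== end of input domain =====

-- B replaces A's three separate boundary/middle constructions by one uniform pairwise pass
-- over a sentinel-padded list (objective: simpler decomposition; no speed claim).

-- ===== PORT A =====
-- literal transliteration of A: guard, then explicit first diphone, index loop, explicit last diphone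
def phonemes_to_diphones_py (phonemes : List String) : List String :=
  if phonemes.length < 2 then
    [if phonemes.isEmpty then "SIL_SIL" else "SIL_" ++ PySem.List.pyGetD phonemes 0 ""]
  else
    let diphones : List String := []
    let diphones := diphones ++ ["SIL_" ++ PySem.List.pyGetD phonemes 0 ""]
    let diphones := (PySem.List.pyRange 0 ((phonemes.length : Int) - 1) 1).foldl
      (fun acc i => acc ++
        [PySem.List.pyGetD phonemes i "" ++ "_" ++ PySem.List.pyGetD phonemes (i + 1) ""]) diphones
    diphones ++ [PySem.List.pyGetD phonemes (-1) "" ++ "_SIL"]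

-- ===== PORT B =====
-- literal transliteration of B: pad with SIL on both sides, map over adjacent pairs
def phonemes_to_diphones_py_alt (phonemes : List String) : List String :=
  if phonemes.length < 2 then
    [if phonemes.isEmpty then "SIL_SIL" else "SIL_" ++ PySem.List.pyGetD phonemes 0 ""]
  else
    let padded := ["SIL"] ++ phonemes ++ ["SIL"]
    (padded.zip (PySem.List.slice padded (some 1) none)).map (fun p => p.1 ++ "_" ++ p.2)

-- ===== PRECONDITION & SPEC =====
def Spec_phonemes_to_diphones_py (phonemes : List String) (out : List String) : Prop := out = phonemes_to_diphones_py_alt phonemes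
instance (phonemes : List String) (out : List String) : Decidable (Spec_phonemes_to_diphones_py phonemes out) := by unfold Spec_phonemes_to_diphones_py; infer_instance

-- ===== CLAIM (what is proved, stated in full; the proofs are below) =====
def Claim_equal_phonemes_to_diphones_py : Prop := ∀ (phonemes : List String), Dom_phonemes_to_diphones_py phonemes → Spec_phonemes_to_diphones_py phonemes (phonemes_to_diphones_py phonemes)

-- ===== LEMMAS AND PROOFS =====

-- A's index loop over range(len-1), as a map over Nat indices, is the pairwise map over zip
theorem pv_rangemap (l : List String) (x : String) :
    (List.range l.length).map
        (fun k => (x :: l).getD k "" ++ "_" ++ (x :: l).getD (k + 1) "")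
      = ((x :: l).zip l).map (fun p => p.1 ++ "_" ++ p.2) := by
  induction l generalizing x with
  | nil => simp
  | cons y t ih =>
    rw [List.length_cons, List.range_succ_eq_map, List.map_cons, List.map_map]
    simp only [List.zip_cons_cons, List.map_cons]
    refine congrArg₂ _ rfl ?_
    simpa [Function.comp, List.getD] using ih y

-- B's pairwise pass over the SIL-padded tail splits into the middle pairs plus the final diphone
theorem pv_zip_append_sil (l : List String) (x : String) :
    ((x :: (l ++ ["SIL"])).zip (l ++ ["SIL"])).map (fun p => p.1 ++ "_" ++ p.2)
      = ((x :: l).zip l).map (fun p => p.1 ++ "_" ++ p.2) ++ [l.getLastD x ++ "_SIL"] := by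
  induction l generalizing x with
  | nil =>
    simp only [List.nil_append, List.zip_cons_cons, List.zip_nil_right,
      List.map_cons, List.map_nil, List.getLastD_nil]
    rw [String.append_assoc]
    exact congrArg (fun t => [x ++ t]) rfl
  | cons y t ih =>
    simp only [List.cons_append, List.zip_cons_cons, List.map_cons, List.getLastD_cons]
    rw [ih y]

-- xs[-1] on a nonempty list is the getLastD of its tail with its head as default
theorem pv_getLast (l : List String) (x : String) :
    (x :: l).getLast?.getD "" = l.getLastD x := by
  induction l generalizing x with
  | nil => rfl
  | cons y t ih => rw [List.getLast?_cons_cons, List.getLastD_cons]; exact ih y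

-- ===== VERDICT (by name: the statement is the Claim_ definition above) =====
theorem phonemes_to_diphones_py_spec : Claim_equal_phonemes_to_diphones_py := by
  intro phonemes _
  unfold Spec_phonemes_to_diphones_py phonemes_to_diphones_py phonemes_to_diphones_py_alt
  by_cases hlen : phonemes.length < 2
  · simp [hlen]
  · simp only [hlen, if_false]
    match phonemes, hlen with
    | x :: l, _ =>
      rw [PySem.List.foldl_append_singleton_eq_map]
      rw [PySem.List.slice_from_one]
      simp only [List.cons_append, List.nil_append, List.tail_cons, List.zip_cons_cons,
        List.map_cons]
      rw [pv_zip_append_sil]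
      have hmid : (PySem.List.pyRange 0 (((x :: l).length : Int) - 1) 1).map
          (fun i => PySem.List.pyGetD (x :: l) i "" ++ "_" ++ PySem.List.pyGetD (x :: l) (i + 1) "")
          = ((x :: l).zip l).map (fun p => p.1 ++ "_" ++ p.2) := by
        rw [← pv_rangemap l x]
        rw [PySem.List.pyRange_one, List.map_map]
        have hn : ((((x :: l).length : Int) - 1 - 0).toNat) = l.length := by
          simp
        rw [hn]
        apply List.map_congr_left
        intro k hk
        simp only [Function.comp]
        have h1 : (0 : Int) + (k : Int) = ((k : Int)) := by omega
        rw [h1]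
        simp [PySem.List.pyGetD, PySem.List.pyGet?_cons_succ, PySem.List.pyGet?_natCast,
          List.getD]
      rw [hmid]
      have hlast : PySem.List.pyGetD (x :: l) (-1) "" = l.getLastD x := by
        simp only [PySem.List.pyGetD, PySem.List.pyGet?_neg_one]
        exact pv_getLast l x
      rw [hlast]
      have hhead : PySem.List.pyGetD (x :: l) 0 "" = x := by
        simp [PySem.List.pyGetD]
      rw [hhead]
      rfl
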